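-- pv_equiv track=rewrite | github.com/ugalock/Project-Euler | 42.py | getTrianglesUpTo
-- ===== SOURCE A (Python) =====
-- def getTrianglesUpTo(bound):
--     res = []
--     val = 1
--     i = 2
--     while val < bound:
--         res.append(val)
--         val += i
--         i += 1
--     return res
-- ===== SOURCE B (Python) =====
-- def _isqrt(n):
--     # integer square root (floor) by Newton's method, for n >= 0
--     if n <= 1:
--         return n
--     guess = n // 2
--     while True:
--         nxt = (guess + n // guess) // 2
--         if nxt < guess:
--             guess = nxt
--         else:
--             return guess
--
-- def getTrianglesUpTo(bound):
--     if bound <= 1: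
--         return []
--     m = (_isqrt(8 * (bound - 1) + 1) - 1) // 2
--     return [n * (n + 1) // 2 for n in range(1, m + 1)]
-- ===== Notes on version B (the rewrite author's own statement) =====
-- stated objective: alternative
-- what changed: Replaces A's running-sum while-loop (accumulator val and increment i) by a closed form: the count m of triangle numbers below bound is derived from an integer square root, and the list is built by the triangle-number formula over a range up to m.
import Mathlib
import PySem

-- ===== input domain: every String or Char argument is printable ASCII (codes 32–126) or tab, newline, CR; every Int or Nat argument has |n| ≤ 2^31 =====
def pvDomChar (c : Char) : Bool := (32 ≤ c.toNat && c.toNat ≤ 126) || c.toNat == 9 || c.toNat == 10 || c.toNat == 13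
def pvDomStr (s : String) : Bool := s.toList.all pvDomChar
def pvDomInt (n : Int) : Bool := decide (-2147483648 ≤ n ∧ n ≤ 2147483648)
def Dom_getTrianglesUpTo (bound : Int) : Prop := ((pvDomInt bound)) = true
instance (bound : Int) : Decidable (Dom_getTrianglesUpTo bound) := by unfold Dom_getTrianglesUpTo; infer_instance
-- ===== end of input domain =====

-- B replaces A's running-sum while-loop by a closed form: it counts the triangle numbers
-- below bound with an integer square root and builds the list by the formula n*(n+1)//2
-- (objective: alternative decomposition, not claimed faster).

-- ===== PORT A =====
-- A's while-loop: state (val, i, res); `0 < i` is only a totality guard, the entry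
-- point always has i = 2 so the guard never fails on reachable states.
def loopA (bound val i : Int) (res : List Int) : List Int :=
  if _h : val < bound then
    if _hi : 0 < i then loopA bound (val + i) (i + 1) (res ++ [val])
    else res
  else res
termination_by (bound - val).toNat
decreasing_by omega

def getTrianglesUpTo (bound : Int) : List Int := loopA bound 1 2 []

-- ===== PORT B =====
-- Source B's _isqrt (Newton's method); its argument 8*(bound-1)+1 is positive whenever it is
-- called, so it is ported on Nat (exact for the nonnegative values that occur).
def isqrtIter (n guess : Nat) : Nat :=
  let nxt := (guess + n / guess) / 2
  if _h : nxt < guess then isqrtIter n nxt else guess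
termination_by guess

def isqrtB (n : Nat) : Nat := if n ≤ 1 then n else isqrtIter n (n / 2)

def getTrianglesUpTo_alt (bound : Int) : List Int :=
  if bound ≤ 1 then []
  else
    let m : Nat := (isqrtB (8 * (bound - 1) + 1).toNat - 1) / 2
    (PySem.List.pyRange 1 ((m : Int) + 1) 1).map (fun n => PySem.Int.floordiv (n * (n + 1)) 2)

-- ===== PRECONDITION & SPEC =====
def Spec_getTrianglesUpTo (bound : Int) (out : List Int) : Prop := out = getTrianglesUpTo_alt bound
instance (bound : Int) (out : List Int) : Decidable (Spec_getTrianglesUpTo bound out) := by unfold Spec_getTrianglesUpTo; infer_instance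

-- ===== CLAIM (what is proved, stated in full; the proofs are below) =====
def Claim_equal_getTrianglesUpTo : Prop := ∀ (bound : Int), Dom_getTrianglesUpTo bound → Spec_getTrianglesUpTo bound (getTrianglesUpTo bound)

-- ===== LEMMAS AND PROOFS =====

-- the k-th triangle number, as A's running value reaches it
def triN (k : Nat) : Int := ((k * (k + 1) / 2 : Nat) : Int)

theorem isqrtIter_eq (n : Nat) : ∀ g, isqrtIter n g = Nat.sqrt.iter n g := by
  intro g
  induction g using Nat.strong_induction_on with
  | _ g ih =>
    rw [isqrtIter]
    unfold Nat.sqrt.iter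
    by_cases h : (g + n / g) / 2 < g
    · simp only [dif_pos h]
      exact ih _ h
    · simp [h]

theorem isqrtB_spec (n : Nat) : isqrtB n * isqrtB n ≤ n ∧ n < (isqrtB n + 1) * (isqrtB n + 1) := by
  unfold isqrtB
  by_cases h : n ≤ 1
  · interval_cases n <;> simp
  · simp only [if_neg h]
    rw [isqrtIter_eq]
    refine ⟨Nat.sqrt.iter_sq_le _ _, Nat.sqrt.lt_iter_succ_sq _ _ ?_⟩
    have h2 : 2 * (n / 2) + n % 2 = n := by omega
    have h3 : 1 ≤ n / 2 := by omega
    have h4 : 1 * 1 ≤ (n / 2) * (n / 2) := Nat.mul_le_mul h3 h3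
    nlinarith [h2, h4, (show n % 2 ≤ 1 by omega)]

-- the isqrt-derived count m characterises "n-th triangle number below bound"
theorem count_spec (bound : Int) (hb : 2 ≤ bound) (n : Nat) (_hn : 1 ≤ n) :
    (triN n < bound ↔ n ≤ (isqrtB (8 * (bound - 1) + 1).toNat - 1) / 2) := by
  set N : Nat := (8 * (bound - 1) + 1).toNat with hN
  set s : Nat := isqrtB N with hs
  obtain ⟨hlo, hhi⟩ := isqrtB_spec N
  rw [← hs] at hlo hhi
  have hN1 : 1 ≤ N := by omega
  have hs1 : 1 ≤ s := by
    by_contra h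
    have : s = 0 := by omega
    rw [this] at hhi
    omega
  obtain ⟨t, ht⟩ := Nat.even_mul_succ_self n
  have htd : n * (n + 1) / 2 = t := by omega
  have hB : (8 * (bound - 1) + 1 : Int) = (N : Int) := by omega
  constructor
  · intro h
    -- n ≤ (s-1)/2 from (2n+1)² ≤ N
    have ht' : (t : Int) < bound := by
      unfold triN at h
      rwa [htd] at h
    have h81 : 8 * t + 1 ≤ N := by omega
    have hsq : (2 * n + 1) * (2 * n + 1) ≤ N := by nlinarith [ht, h81]
    have h2n : 2 * n + 1 < s + 1 := by
      by_contra hcon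
      have : s + 1 ≤ 2 * n + 1 := by omega
      have : (s + 1) * (s + 1) ≤ (2 * n + 1) * (2 * n + 1) := Nat.mul_le_mul this this
      omega
    omega
  · intro h
    have h2n : 2 * n + 1 ≤ s := by omega
    have hsq : (2 * n + 1) * (2 * n + 1) ≤ N := le_trans (Nat.mul_le_mul h2n h2n) hlo
    have h8t : 8 * t + 1 ≤ N := by nlinarith [ht, hsq]
    have : (t : Int) < bound := by omega
    unfold triN
    rwa [htd]

-- the loop, started at the k-th triangle number, appends triangles k+1 … m
theorem loop_spec (bound : Int) (m : Nat)
    (Hm : ∀ n : Nat, 1 ≤ n → (triN n < bound ↔ n ≤ m)) :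
    ∀ d k (res : List Int), m - k = d →
      loopA bound (triN (k + 1)) ((k : Int) + 2) res =
        res ++ (PySem.List.pyRange ((k : Int) + 1) ((m : Int) + 1) 1).map
          (fun n => PySem.Int.floordiv (n * (n + 1)) 2) := by
  intro d
  induction d with
  | zero =>
    intro k res hk
    have hmk : m ≤ k := by omega
    have hnot : ¬ triN (k + 1) < bound := by
      rw [Hm (k + 1) (by omega)]; omega
    rw [loopA, dif_neg hnot, PySem.List.pyRange_one_eq_nil (by omega)]
    simp
  | succ d ih =>
    intro k res hk
    have hkm : k < m := by omega
    have hlt : triN (k + 1) < bound := by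
      rw [Hm (k + 1) (by omega)]; omega
    obtain ⟨t1, ht1⟩ := Nat.even_mul_succ_self (k + 1)
    obtain ⟨t2, ht2⟩ := Nat.even_mul_succ_self (k + 2)
    have hstep : triN (k + 1) + ((k : Int) + 2) = triN (k + 2) := by
      unfold triN
      have e1 : (k + 1) * (k + 1 + 1) / 2 = t1 := by omega
      have e2 : (k + 2) * (k + 2 + 1) / 2 = t2 := by omega
      rw [e1, e2]
      have : t2 = t1 + (k + 2) := by nlinarith [ht1, ht2]
      omega
    rw [loopA, dif_pos hlt, dif_pos (by omega : (0 : Int) < (k : Int) + 2), hstep]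
    have harg : (k : Int) + 2 + 1 = ((k + 1 : Nat) : Int) + 2 := by push_cast; ring
    have harg2 : triN (k + 2) = triN ((k + 1) + 1) := rfl
    rw [harg, harg2, ih (k + 1) (res ++ [triN (k + 1)]) (by omega)]
    rw [PySem.List.pyRange_one_cons (by push_cast; omega : (k : Int) + 1 < (m : Int) + 1)]
    have hhead : PySem.Int.floordiv (((k : Int) + 1) * (((k : Int) + 1) + 1)) 2 = triN (k + 1) := by
      rw [PySem.Int.floordiv_eq_ediv_of_pos (by omega)]
      unfold triN
      have e1 : (k + 1) * (k + 1 + 1) / 2 = t1 := by omega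
      rw [e1]
      have hZ : ((k : Int) + 1) * (((k : Int) + 1) + 1) = (t1 : Int) + t1 := by
        exact_mod_cast ht1
      omega
    have hcast : ((k + 1 : Nat) : Int) + 1 = (k : Int) + 1 + 1 := by push_cast; ring
    simp only [List.map_cons, hhead, hcast]
    simp

-- ===== VERDICT (by name: the statement is the Claim_ definition above) =====
theorem getTrianglesUpTo_spec : Claim_equal_getTrianglesUpTo := by
  intro bound _
  unfold Spec_getTrianglesUpTo
  by_cases hb : bound ≤ 1
  · unfold getTrianglesUpTo getTrianglesUpTo_alt
    rw [loopA, dif_neg (by omega : ¬ (1 : Int) < bound), if_pos hb]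
  · have hb2 : 2 ≤ bound := by omega
    have halt : getTrianglesUpTo_alt bound =
        (PySem.List.pyRange 1 ((((isqrtB (8 * (bound - 1) + 1).toNat - 1) / 2 : Nat) : Int) + 1) 1).map
          (fun n => PySem.Int.floordiv (n * (n + 1)) 2) := by
      unfold getTrianglesUpTo_alt; rw [if_neg hb]
    have hstart : getTrianglesUpTo bound = loopA bound (triN (0 + 1)) (((0 : Nat) : Int) + 2) [] := by
      unfold getTrianglesUpTo; norm_num [triN]
    rw [halt, hstart,
      loop_spec bound _ (fun n hn => count_spec bound hb2 n hn) _ 0 [] rfl]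
    norm_num
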